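-- pv_equiv track=rewrite | github.com/sploithunter/harnesss-bench | scripts/generate_charts_from_summary.py | filter_latest_results
-- ===== SOURCE A (Python) =====
-- def filter_latest_results(results: list[dict]) -> list[dict]:
--     """Keep only the latest result for each harness/model combination."""
--     latest = {}
--
--     for r in results:
--         key = (r["harness"], r["model"])
--         timestamp = r.get("timestamp", "")
--
--         if key not in latest or timestamp > latest[key]["timestamp"]:
--             latest[key] = r
--
--     return list(latest.values())
-- ===== SOURCE B (Python) =====
-- def filter_latest_results(results: list[dict]) -> list[dict]:
--     """Keep only the latest result for each harness/model combination."""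
--     groups = {}
--     for r in results:
--         groups.setdefault((r["harness"], r["model"]), []).append(r)
--     return [max(g, key=lambda r: r.get("timestamp", ""))
--             for g in groups.values()]
-- ===== Notes on version B (the rewrite author's own statement) =====
-- stated objective: alternative
-- what changed: B replaces A's single-pass running-best dict (conditional overwrite on strictly greater timestamp) by a two-phase group-then-reduce: first build an order-preserving dict of full per-(harness,model) groups, then pick each group's max by timestamp (max returns the first maximal element, matching A's strict-> tie-breaking and first-appearance key order).
-- crash fix: On inputs outside Pre_ where every record has 'harness' and 'model' but a first occurrence of a repeated key lacks 'timestamp', A raises KeyError('timestamp') while B (using r.get('timestamp','') inside max) returns the latest record of each group. — e.g. on filter_latest_results([[("harness", "h"), ("model", "m")], [("harness", "h"), ("model", "m"), ("timestamp", "1")]]): A raises KeyError, B returns [[("harness", "h"), ("model", "m"), ("timestamp", "1")]]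
import Mathlib
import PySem

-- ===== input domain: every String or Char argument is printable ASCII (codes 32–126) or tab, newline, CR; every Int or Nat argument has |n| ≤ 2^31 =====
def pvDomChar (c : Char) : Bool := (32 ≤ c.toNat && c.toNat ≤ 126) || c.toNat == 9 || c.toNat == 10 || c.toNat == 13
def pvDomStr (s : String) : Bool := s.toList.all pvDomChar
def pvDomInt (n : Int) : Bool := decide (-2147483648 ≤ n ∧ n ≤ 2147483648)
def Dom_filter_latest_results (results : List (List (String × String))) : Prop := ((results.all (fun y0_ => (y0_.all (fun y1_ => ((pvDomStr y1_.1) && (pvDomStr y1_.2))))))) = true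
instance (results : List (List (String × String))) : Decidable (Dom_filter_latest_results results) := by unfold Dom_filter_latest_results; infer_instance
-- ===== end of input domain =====

-- B groups all results per (harness, model) key and then reduces each group with max by
-- timestamp (a two-phase decomposition); same output values and order as A.


-- a record is a Python dict, given as an association list; pvRGet r k d = r.get(k, d)
def pvRGet (r : List (String × String)) (k dflt : String) : String :=
  ((r.find? (fun p => p.1 == k)).map (fun p => p.2)).getD dflt

-- (r["harness"], r["model"]) — the defaults are only reached outside Pre_ (Python raises KeyError there)
def pvKey (r : List (String × String)) : String × String :=
  (pvRGet r "harness" "", pvRGet r "model" "")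

-- ===== PORT A =====
def filter_latest_results (results : List (List (String × String))) : List (List (String × String)) :=
  let latest : PySem.Dict (String × String) (List (String × String)) :=
    results.foldl (fun latest r =>
      let key := pvKey r
      let timestamp := pvRGet r "timestamp" ""
      match latest.get? key with
      | none => latest.insert key r           -- key not in latest
      | some cur =>                           -- timestamp > latest[key]["timestamp"]
          if (pvRGet cur "timestamp" "").toList < timestamp.toList then latest.insert key r else latest)
      (PySem.Dict.mk [])
  latest.values

-- ===== PORT B =====
-- max(g, key=lambda r: r.get("timestamp", "")) — first maximal element; g is never empty in B
def pvBest (g : List (List (String × String))) : List (String × String) :=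
  match PySem.List.max? g (fun r => (pvRGet r "timestamp" "").toList) with
  | some m => m
  | none => []
def filter_latest_results_alt (results : List (List (String × String))) : List (List (String × String)) :=
  let groups : PySem.Dict (String × String) (List (List (String × String))) :=
    results.foldl (fun g r =>
      let key := pvKey r
      match g.get? key with                   -- groups.setdefault(key, []).append(r)
      | none => g.insert key [r]
      | some l => g.insert key (l ++ [r]))
      (PySem.Dict.mk [])
  groups.values.map pvBest

-- ===== PRECONDITION & SPEC =====
def pvHasKey (r : List (String × String)) (k : String) : Bool := (r.find? (fun p => p.1 == k)).isSome

-- true unless some record is the first occurrence of its key, lacks "timestamp", and its key recurs later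
def pvTsOK (results : List (List (String × String))) : Bool :=
  (List.range results.length).all (fun i =>
    pvHasKey (results.getD i []) "timestamp"
    || (List.range i).any (fun l => pvKey (results.getD l []) == pvKey (results.getD i []))
    || (List.range results.length).all (fun j =>
         !(decide (i < j)) || !(pvKey (results.getD i []) == pvKey (results.getD j []))))

-- Pre_ excludes exactly the inputs where the Python A raises KeyError: a record missing
-- "harness"/"model", or a first occurrence of a repeated key missing "timestamp" (the stored
-- record then lacks "timestamp" when its key recurs, and latest[key]["timestamp"] raises).
def Pre_filter_latest_results (results : List (List (String × String))) : Prop :=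
  (∀ r ∈ results, pvHasKey r "harness" = true ∧ pvHasKey r "model" = true) ∧ pvTsOK results = true
instance (results : List (List (String × String))) : Decidable (Pre_filter_latest_results results) := by
  unfold Pre_filter_latest_results; infer_instance
def pvWitness_filter_latest_results : (List (List (String × String))) :=
  [[("harness", "h1"), ("model", "m"), ("timestamp", "2024")],
   [("harness", "h1"), ("model", "m"), ("timestamp", "2025")],
   [("harness", "h2"), ("model", "m")]]

-- A raises KeyError("timestamp") when every record has "harness" and "model" but some first
-- occurrence of a repeated key lacks "timestamp"; B returns the latest record of each group there.
def Raises_filter_latest_results (results : List (List (String × String))) : Prop :=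
  (∀ r ∈ results, pvHasKey r "harness" = true ∧ pvHasKey r "model" = true) ∧ pvTsOK results = false
instance (results : List (List (String × String))) : Decidable (Raises_filter_latest_results results) := by
  unfold Raises_filter_latest_results; infer_instance
def pvRaiseWitness_filter_latest_results : (List (List (String × String))) :=
  [[("harness", "h"), ("model", "m")],
   [("harness", "h"), ("model", "m"), ("timestamp", "1")]]
def pvRaiseWitnessOut_filter_latest_results : List (List (String × String)) :=
  [[("harness", "h"), ("model", "m"), ("timestamp", "1")]]

def Spec_filter_latest_results (results : List (List (String × String))) (out : List (List (String × String))) : Prop := out = filter_latest_results_alt results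
instance (results : List (List (String × String))) (out : List (List (String × String))) : Decidable (Spec_filter_latest_results results out) := by unfold Spec_filter_latest_results; infer_instance

-- ===== CLAIM (what is proved, stated in full; the proofs are below) =====
def Claim_equal_filter_latest_results : Prop := ∀ (results : List (List (String × String))), Dom_filter_latest_results results → Pre_filter_latest_results results → Spec_filter_latest_results results (filter_latest_results results)
def Claim_raises_filter_latest_results : Prop := (∀ (results : List (List (String × String))), Dom_filter_latest_results results → Raises_filter_latest_results results → ¬ Pre_filter_latest_results results) ∧ (Dom_filter_latest_results (pvRaiseWitness_filter_latest_results) ∧ Raises_filter_latest_results (pvRaiseWitness_filter_latest_results) ∧ filter_latest_results_alt (pvRaiseWitness_filter_latest_results) = pvRaiseWitnessOut_filter_latest_results)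
-- ===== LEMMAS AND PROOFS =====

-- mapping a function over the values of a dict
def pvMapVals {ν ν' : Type} (f : ν → ν') (d : PySem.Dict (String × String) ν) : PySem.Dict (String × String) ν' :=
  PySem.Dict.mk (d.items.map (fun p => (p.1, f p.2)))

theorem pv_get?_mapVals {ν ν' : Type} (f : ν → ν') (d : PySem.Dict (String × String) ν) (k : String × String) :
    (pvMapVals f d).get? k = (d.get? k).map f := by
  simp [pvMapVals, PySem.Dict.get?, Option.map_map, Function.comp_def]

theorem pv_keys_mapVals {ν ν' : Type} (f : ν → ν') (d : PySem.Dict (String × String) ν) :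
    (pvMapVals f d).keys = d.keys := by
  simp [pvMapVals, PySem.Dict.keys, List.map_map]

theorem pv_contains_mapVals {ν ν' : Type} (f : ν → ν') (d : PySem.Dict (String × String) ν) (k : String × String) :
    (pvMapVals f d).contains k = d.contains k := by
  simp [pvMapVals, PySem.Dict.contains, List.any_map, Function.comp_def]

theorem pv_insert_mapVals {ν ν' : Type} (f : ν → ν') (d : PySem.Dict (String × String) ν) (k : String × String) (v : ν) :
    pvMapVals f (d.insert k v) = (pvMapVals f d).insert k (f v) := by
  simp only [PySem.Dict.insert, pv_contains_mapVals]
  by_cases h : d.contains k = true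
  · simp only [h, if_pos]
    apply PySem.Dict.ext
    simp only [pvMapVals, List.map_map]
    apply List.map_congr_left
    intro p _
    by_cases hp : p.1 = k <;> simp [hp]
  · simp only [h, if_neg, Bool.not_eq_true] at *
    simp [pvMapVals]

theorem pv_values_mapVals {ν ν' : Type} (f : ν → ν') (d : PySem.Dict (String × String) ν) :
    (pvMapVals f d).values = d.values.map f := by
  simp [pvMapVals, PySem.Dict.values, List.map_map]

-- with unique keys, re-inserting the stored value changes nothing
theorem pv_insert_same_items (k : String × String) (v : List (String × String))
    (l : List ((String × String) × List (String × String)))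
    (hn : (l.map (fun p => p.1)).Nodup)
    (h : Option.map (fun p => p.2) (List.find? (fun p => p.1 == k) l) = some v) :
    l.map (fun p => if (p.1 == k) = true then (k, v) else p) = l := by
  induction l with
  | nil => simp at h
  | cons p t ih =>
      simp only [List.map_cons, List.nodup_cons] at hn
      by_cases hp : (p.1 == k) = true
      · rw [show List.find? (fun p => p.1 == k) (p :: t) = some p from List.find?_cons_of_pos hp] at h
        simp only [Option.map_some, Option.some.injEq] at h
        have hpk : p = (k, v) := by
          obtain ⟨p1, p2⟩ := p
          simp only [beq_iff_eq] at hp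
          simp_all
        rw [List.map_cons, if_pos hp]
        refine congrArg₂ List.cons hpk.symm ?_
        have hall : ∀ q ∈ t, (if (q.1 == k) = true then (k, v) else q) = q := by
          intro q hq
          have : ¬ (q.1 == k) = true := by
            intro hqk
            have hmem : q.1 ∈ t.map (fun x => x.1) := List.mem_map.mpr ⟨q, hq, rfl⟩
            simp only [beq_iff_eq] at hqk hp
            rw [hqk, ← hp] at hmem
            exact hn.1 hmem
          simp [this]
        rw [List.map_congr_left hall]
        simp
      · rw [show List.find? (fun p => p.1 == k) (p :: t) = List.find? (fun p => p.1 == k) t from List.find?_cons_of_neg (by simpa using hp)] at h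
        simp only [List.map_cons, hp, Bool.false_eq_true, if_false]
        rw [ih hn.2 h]

theorem pv_insert_same (d : PySem.Dict (String × String) (List (String × String))) (k : String × String) (v : List (String × String))
    (hn : d.keys.Nodup) (h : d.get? k = some v) : d.insert k v = d := by
  obtain ⟨l⟩ := d
  have hq : ∃ q, List.find? (fun p => p.1 == k) l = some q := by
    cases hf : List.find? (fun p => p.1 == k) l with
    | none => simp [PySem.Dict.get?, hf] at h
    | some q => exact ⟨q, rfl⟩
  obtain ⟨q, hf⟩ := hq
  have hc : (PySem.Dict.mk l).contains k = true := by
    have hpq := List.find?_some hf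
    have hmem := List.mem_of_find?_eq_some hf
    simp only [PySem.Dict.contains]
    exact List.any_eq_true.mpr ⟨q, hmem, hpq⟩
  simp only [PySem.Dict.insert, hc, if_pos]
  apply PySem.Dict.ext
  exact pv_insert_same_items k v l (by simpa [PySem.Dict.keys] using hn) (by simpa [PySem.Dict.get?] using h)

-- max over g ++ [r] is one strict-comparison step on max over g
theorem pv_best_append (g : List (List (String × String))) (r : List (String × String)) (hg : g ≠ []) :
    pvBest (g ++ [r]) =
      if (pvRGet (pvBest g) "timestamp" "").toList < (pvRGet r "timestamp" "").toList then r else pvBest g := by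
  have h : ∃ m, PySem.List.max? g (fun r => (pvRGet r "timestamp" "").toList) = some m := by
    cases hh : PySem.List.max? g (fun r => (pvRGet r "timestamp" "").toList) with
    | none => exact absurd ((PySem.List.max?_eq_none_iff _ _).mp hh) hg
    | some m => exact ⟨m, rfl⟩
  obtain ⟨m, hm⟩ := h
  have hbg : pvBest g = m := by unfold pvBest; rw [hm]
  have hfold : PySem.List.max? (g ++ [r]) (fun r => (pvRGet r "timestamp" "").toList)
      = some (if (pvRGet m "timestamp" "").toList < (pvRGet r "timestamp" "").toList then r else m) := by
    simp only [PySem.List.max?] at hm ⊢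
    rw [List.foldl_append, hm]
    simp only [List.foldl_cons, List.foldl_nil]
    split <;> rfl
  unfold pvBest
  rw [hfold, hm]

-- the loop invariant: A's dict is B's groups dict with every group reduced by pvBest
theorem pv_main (rs : List (List (String × String)))
    (G : PySem.Dict (String × String) (List (List (String × String))))
    (hn : G.keys.Nodup)
    (hne : ∀ p ∈ G.items, p.2 ≠ []) :
    rs.foldl (fun latest r =>
      let key := pvKey r
      let timestamp := pvRGet r "timestamp" ""
      match latest.get? key with
      | none => latest.insert key r
      | some cur =>
          if (pvRGet cur "timestamp" "").toList < timestamp.toList then latest.insert key r else latest)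
      (pvMapVals pvBest G)
    = pvMapVals pvBest (rs.foldl (fun g r =>
        let key := pvKey r
        match g.get? key with
        | none => g.insert key [r]
        | some l => g.insert key (l ++ [r])) G) := by
  induction rs generalizing G with
  | nil => rfl
  | cons r t ih =>
      simp only [List.foldl_cons]
      cases hg : G.get? (pvKey r) with
      | none =>
          have hA : (pvMapVals pvBest G).get? (pvKey r) = none := by
            rw [pv_get?_mapVals, hg]; rfl
          simp only [hA]
          rw [show (pvMapVals pvBest G).insert (pvKey r) r
                = pvMapVals pvBest (G.insert (pvKey r) [r]) from by
            rw [pv_insert_mapVals]; rfl]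
          exact ih _ (PySem.Dict.nodup_keys_insert _ _ _ hn)
            (by intro p hp
                rcases (PySem.Dict.mem_items_insert _ _ _ _).mp hp with h1 | h2
                · simp [h1]
                · exact hne p h2.1)
      | some g =>
          have hgne : g ≠ [] := hne (pvKey r, g) (PySem.Dict.mem_items_of_get?_eq_some _ hg)
          have hA : (pvMapVals pvBest G).get? (pvKey r) = some (pvBest g) := by
            rw [pv_get?_mapVals, hg]; rfl
          simp only [hA]
          have hstep : pvMapVals pvBest (G.insert (pvKey r) (g ++ [r]))
              = (if (pvRGet (pvBest g) "timestamp" "").toList < (pvRGet r "timestamp" "").toList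
                 then (pvMapVals pvBest G).insert (pvKey r) r
                 else pvMapVals pvBest G) := by
            rw [pv_insert_mapVals, pv_best_append g r hgne]
            split
            · rfl
            · exact pv_insert_same _ _ _ (by rw [pv_keys_mapVals]; exact hn) hA
          have hinv1 := PySem.Dict.nodup_keys_insert G (pvKey r) (g ++ [r]) hn
          have hinv2 : ∀ p ∈ (G.insert (pvKey r) (g ++ [r])).items, p.2 ≠ [] := by
            intro p hp
            rcases (PySem.Dict.mem_items_insert _ _ _ _).mp hp with h1 | h2
            · simp [h1]
            · exact hne p h2.1
          rw [← hstep]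
          exact ih _ hinv1 hinv2

-- ===== VERDICT (by name: the statement is the Claim_ definition above) =====
theorem filter_latest_results_spec : Claim_equal_filter_latest_results := by
  intro results _ _
  unfold Spec_filter_latest_results filter_latest_results filter_latest_results_alt
  have h := pv_main results (PySem.Dict.mk []) (by simp [PySem.Dict.keys]) (by intro p hp; simp at hp)
  simp only at h ⊢
  rw [show (PySem.Dict.mk ([] : List ((String × String) × List (String × String))))
        = pvMapVals pvBest (PySem.Dict.mk []) from rfl, h, pv_values_mapVals]

theorem filter_latest_results_raises : Claim_raises_filter_latest_results := by
  unfold Claim_raises_filter_latest_results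
  exact ⟨by
    intro results _ hr hp
    unfold Raises_filter_latest_results at hr
    unfold Pre_filter_latest_results at hp
    rw [hp.2] at hr
    exact absurd hr.2 (by simp), by decide⟩

-- witness self-check: the stated raise witness really lies inside Raises_
theorem pvRaiseWitness_ok : Raises_filter_latest_results pvRaiseWitness_filter_latest_results :=
  filter_latest_results_raises.2.2.1
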